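-- pv_equiv track=rewrite | github.com/muhit-emon/DeepMRG | Codes/evaluate.py | find_ref_exp_mrg_class
-- ===== SOURCE A (Python) =====
-- index_of_metals = {
--     'Aluminium (Al)': 0,
--     'Antimony (Sb)': 1,
--     'Arsenic (As)': 2,
--     'Bismuth (Bi)': 3,
--     'Cadmium (Cd)': 4,
--     'Chromium (Cr)': 5,
--     'Cobalt (Co)': 6,
--     'Copper (Cu)': 7,
--     'Gallium (Ga)': 8,
--     'Gold (Au)': 9,
--     'Iron (Fe)': 10,
--     'Lead (Pb)': 11,
--     'Magnesium (Mg)': 12,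
--     'Manganese (Mn)': 13,
--     'Mercury (Hg)': 14,
--     'Molybdenum (Mo)': 15,
--     'Nickel (Ni)': 16,
--     'Selenium (Se)': 17,
--     'Silver (Ag)': 18,
--     'Tellurium (Te)': 19,
--     'Tungsten (W)': 20,
--     'Vanadium (V)': 21,
--     'Zinc (Zn)': 22
-- }
--
-- def find_ref_exp_mrg_class(metals):
--     '''
--     argument metals can be like Zinc (Zn), Copper (Cu) i.e., csv
--     '''
--     L = []
--     ref_exp_mrg_class = ""
--     metal_list = metals.split(',')
--     for i in metal_list:
--         L.append((index_of_metals[i.strip()], i.strip()))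
--
--     L.sort()
--     for i, metal in L:
--         ref_exp_mrg_class+=metal + ','
--     ref_exp_mrg_class = ref_exp_mrg_class[:-1]
--     return ref_exp_mrg_class
-- ===== SOURCE B (Python) =====
-- index_of_metals = {
--     'Aluminium (Al)': 0,
--     'Antimony (Sb)': 1,
--     'Arsenic (As)': 2,
--     'Bismuth (Bi)': 3,
--     'Cadmium (Cd)': 4,
--     'Chromium (Cr)': 5,
--     'Cobalt (Co)': 6,
--     'Copper (Cu)': 7,
--     'Gallium (Ga)': 8,
--     'Gold (Au)': 9,
--     'Iron (Fe)': 10,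
--     'Lead (Pb)': 11,
--     'Magnesium (Mg)': 12,
--     'Manganese (Mn)': 13,
--     'Mercury (Hg)': 14,
--     'Molybdenum (Mo)': 15,
--     'Nickel (Ni)': 16,
--     'Selenium (Se)': 17,
--     'Silver (Ag)': 18,
--     'Tellurium (Te)': 19,
--     'Tungsten (W)': 20,
--     'Vanadium (V)': 21,
--     'Zinc (Zn)': 22
-- }
--
-- def find_ref_exp_mrg_class(metals):
--     # Counting/bucket pass over the fixed index range instead of a comparison sort.
--     counts = {}
--     for part in metals.split(','):
--         idx = index_of_metals[part.strip()]
--         counts[idx] = counts.get(idx, 0) + 1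
--     name_of_index = {v: k for k, v in index_of_metals.items()}
--     out = []
--     for idx in range(len(index_of_metals)):
--         out.extend([name_of_index[idx]] * counts.get(idx, 0))
--     return ','.join(out)
-- ===== Notes on version B (the rewrite author's own statement) =====
-- stated objective: alternative
-- what changed: Replaces A's build-(index,name)-pairs + comparison sort + string concatenation with trailing-comma trim by a single counting pass into an index-keyed dict followed by a bucket traversal of the fixed index range 0..22 (reverse index-to-name map), rejoined with comma separators.
import Mathlib
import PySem

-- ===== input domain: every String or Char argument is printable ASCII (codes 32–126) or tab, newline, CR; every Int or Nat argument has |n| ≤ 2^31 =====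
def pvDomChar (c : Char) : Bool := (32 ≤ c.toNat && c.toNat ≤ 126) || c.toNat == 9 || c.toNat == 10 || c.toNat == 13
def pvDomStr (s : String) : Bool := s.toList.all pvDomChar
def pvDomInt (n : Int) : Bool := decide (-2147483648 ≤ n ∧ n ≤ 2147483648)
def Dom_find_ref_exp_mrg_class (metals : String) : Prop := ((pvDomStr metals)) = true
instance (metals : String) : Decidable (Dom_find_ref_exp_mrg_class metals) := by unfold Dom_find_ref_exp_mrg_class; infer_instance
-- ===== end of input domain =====

-- B replaces A's build-pairs/sort/concat by a counting pass over the fixed metal-index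
-- range (bucket ordering, no comparison sort); equivalence of the return values is proved
-- on inputs whose comma-separated entries are all valid metal names (Pre_).

-- ===== PORT A =====
def metalPairs : List (String × Int) :=
  [("Aluminium (Al)", 0), ("Antimony (Sb)", 1), ("Arsenic (As)", 2), ("Bismuth (Bi)", 3),
   ("Cadmium (Cd)", 4), ("Chromium (Cr)", 5), ("Cobalt (Co)", 6), ("Copper (Cu)", 7),
   ("Gallium (Ga)", 8), ("Gold (Au)", 9), ("Iron (Fe)", 10), ("Lead (Pb)", 11),
   ("Magnesium (Mg)", 12), ("Manganese (Mn)", 13), ("Mercury (Hg)", 14), ("Molybdenum (Mo)", 15),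
   ("Nickel (Ni)", 16), ("Selenium (Se)", 17), ("Silver (Ag)", 18), ("Tellurium (Te)", 19),
   ("Tungsten (W)", 20), ("Vanadium (V)", 21), ("Zinc (Zn)", 22)]

def indexOfMetals : PySem.Dict String Int := PySem.Dict.ofList metalPairs

-- index_of_metals[k] raises KeyError on a missing key; Pre_ excludes that, the port uses getD 0 there
def find_ref_exp_mrg_class (metals : String) : String :=
  let metal_list := (PySem.Str.split? metals ",").getD []   -- sep "," ≠ "", so split? is always some
  let L := metal_list.foldl
    (fun acc i => acc ++ [(((indexOfMetals.get? (PySem.Str.strip i)).getD 0, PySem.Str.strip i) : Int × String)]) []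
  let Ls := PySem.List.sorted2 L (fun p => p.1) (fun p => p.2)
  let ref := Ls.foldl (fun acc p => acc ++ p.2 ++ ",") ""
  PySem.Str.slice ref none (some (-1))

-- ===== PORT B =====
def nameOfIndex : PySem.Dict Int String :=
  PySem.Dict.ofList (indexOfMetals.items.map (fun p => (p.2, p.1)))

-- same KeyError spot as A (excluded by Pre_); counts.get(idx, 0) is Dict.getD
def find_ref_exp_mrg_class_alt (metals : String) : String :=
  let counts := ((PySem.Str.split? metals ",").getD []).foldl
    (fun d part =>
      let i := (indexOfMetals.get? (PySem.Str.strip part)).getD 0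
      d.insert i (d.getD i 0 + (1 : Int))) PySem.Dict.empty
  let out := (PySem.List.pyRange 0 (indexOfMetals.size : Int)).foldl
    (fun acc i => acc ++ List.replicate (counts.getD i 0).toNat ((nameOfIndex.get? i).getD "")) []
  PySem.Str.join "," out

-- ===== PRECONDITION & SPEC =====
-- Pre_ excludes exactly the inputs on which Python A raises KeyError: some comma-separated
-- entry whose stripped form is not a key of index_of_metals.
def Pre_find_ref_exp_mrg_class (metals : String) : Prop :=
  ∀ p ∈ (PySem.Str.split? metals ",").getD [], indexOfMetals.contains (PySem.Str.strip p) = true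
instance (metals : String) : Decidable (Pre_find_ref_exp_mrg_class metals) := by
  unfold Pre_find_ref_exp_mrg_class; infer_instance

def pvWitness_find_ref_exp_mrg_class : String := "Zinc (Zn), Gold (Au), Zinc (Zn)"

def Spec_find_ref_exp_mrg_class (metals : String) (out : String) : Prop := out = find_ref_exp_mrg_class_alt metals
instance (metals : String) (out : String) : Decidable (Spec_find_ref_exp_mrg_class metals out) := by unfold Spec_find_ref_exp_mrg_class; infer_instance

-- ===== CLAIM (what is proved, stated in full; the proofs are below) =====
def Claim_equal_find_ref_exp_mrg_class : Prop := ∀ (metals : String), Dom_find_ref_exp_mrg_class metals → Pre_find_ref_exp_mrg_class metals → Spec_find_ref_exp_mrg_class metals (find_ref_exp_mrg_class metals)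

-- ===== LEMMAS AND PROOFS =====

-- proof-side abbreviations
def idxOf (s : String) : Int := (indexOfMetals.get? s).getD 0
def nameAt (i : Int) : String := (nameOfIndex.get? i).getD ""
def gI (i : Int) : Int × String := (i, nameAt i)
def lt2 (a b : Int × String) : Bool :=
  decide (a.1 < b.1) || (!decide (b.1 < a.1) && decide (a.2 < b.2))

theorem key_facts (s : String) (h : indexOfMetals.contains s = true) :
    nameAt (idxOf s) = s ∧ 0 ≤ idxOf s ∧ idxOf s < 23 := by
  have hk : s ∈ indexOfMetals.keys := (PySem.Dict.contains_iff_mem_keys _ _).mp h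
  have hkeys : indexOfMetals.keys = metalPairs.map Prod.fst := by decide
  rw [hkeys] at hk
  fin_cases hk <;> decide

theorem lt2_gI (a b : Int) : lt2 (gI a) (gI b) = decide (a < b) := by
  rcases lt_trichotomy a b with h | h | h
  · simp [lt2, gI, h]
  · subst h; simp [lt2, gI]
  · simp [lt2, gI, h, not_lt_of_gt h]

theorem insertBy_map_gI (ys : List Int) (x : Int) :
    PySem.List.insertBy lt2 (gI x) (ys.map gI)
      = (PySem.List.insertBy (fun a b => decide (a < b)) x ys).map gI := by
  induction ys with
  | nil => simp [PySem.List.insertBy]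
  | cons y ys ih =>
      simp only [List.map_cons, PySem.List.insertBy, lt2_gI]
      by_cases h : (decide (x < y) : Bool) = true
      · simp [h]
      · simp [h, ih]

theorem sorted2_map_gI (is : List Int) :
    PySem.List.sorted2 (is.map gI) (fun p => p.1) (fun p => p.2) false
      = (PySem.List.sorted is (fun x => x) false).map gI := by
  have h1 : PySem.List.sorted2 (is.map gI) (fun p => p.1) (fun p => p.2) false
      = (is.map gI).foldl (fun acc x => PySem.List.insertBy lt2 x acc) [] := rfl
  rw [h1, PySem.List.sorted_eq_foldl_insertBy, List.foldl_map]
  suffices h : ∀ (js : List Int) (acc : List Int),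
      js.foldl (fun acc x => PySem.List.insertBy lt2 (gI x) acc) (acc.map gI)
        = (js.foldl (fun acc x => PySem.List.insertBy (fun a b => decide (a < b)) x acc) acc).map gI by
    simpa using h is []
  intro js
  induction js with
  | nil => intro acc; simp
  | cons i is ih =>
      intro acc
      rw [List.foldl_cons, List.foldl_cons, insertBy_map_gI, ih]

theorem count_flatMap_replicate (is : List Int) (ks : List Int) (hnd : ks.Nodup) (a : Int) :
    (ks.flatMap (fun k => List.replicate (is.count k) k)).count a
      = if a ∈ ks then is.count a else 0 := by
  induction ks with
  | nil => simp
  | cons k ks ih =>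
      rcases List.nodup_cons.mp hnd with ⟨hk, hnd'⟩
      simp only [List.flatMap_cons, List.count_append, ih hnd', List.mem_cons,
        List.count_replicate]
      by_cases hak : a = k
      · subst hak; simp [hk]
      · simp [hak, Ne.symm hak]

theorem sorted_buckets (is : List Int) (h : ∀ i ∈ is, 0 ≤ i ∧ i < 23) :
    PySem.List.sorted is (fun x => x) false
      = (PySem.List.pyRange 0 23).flatMap (fun k => List.replicate (is.count k) k) := by
  have hR : PySem.List.pyRange 0 23 = List.map (fun k : Nat => (k : Int)) (List.range 23) := by decide
  have hnd : (PySem.List.pyRange 0 23).Nodup := by decide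
  have hmem : ∀ a : Int, a ∈ PySem.List.pyRange 0 23 ↔ (0 ≤ a ∧ a < 23) := by
    intro a
    rw [hR]
    simp only [List.mem_map, List.mem_range]
    constructor
    · rintro ⟨k, hk, rfl⟩
      exact ⟨Int.natCast_nonneg k, by exact_mod_cast hk⟩
    · rintro ⟨h0, h23⟩
      exact ⟨a.toNat, by omega, by simp [Int.toNat_of_nonneg h0]⟩
  apply PySem.List.sorted_id_eq_of_perm_of_pairwise
  · rw [List.perm_iff_count]
    intro a
    rw [count_flatMap_replicate is _ hnd a]
    by_cases hm : a ∈ PySem.List.pyRange 0 23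
    · simp [hm]
    · simp only [hm, if_false]
      exact (List.count_eq_zero.mpr (fun hmem' => hm ((hmem a).mpr (h a hmem')))).symm
  · rw [List.pairwise_flatMap]
    constructor
    · intro k _
      exact (List.pairwise_replicate).mpr (Or.inr le_rfl)
    · have hple : (PySem.List.pyRange 0 23).Pairwise (fun a b : Int => a ≤ b) := by
        rw [hR]
        exact List.Pairwise.map _ (fun a b hlt => by exact_mod_cast le_of_lt hlt)
          List.pairwise_lt_range
      refine hple.imp ?_
      intro a b hab x hx y hy
      rw [List.eq_of_mem_replicate hx, List.eq_of_mem_replicate hy]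
      exact hab

theorem foldl_str_comma (ns : List String) (acc : String) :
    (ns.foldl (fun acc s => acc ++ s ++ ",") acc).toList
      = (ns.map String.toList).foldl (fun a n => a ++ n ++ [',']) acc.toList := by
  induction ns generalizing acc with
  | nil => simp
  | cons n ns ih =>
      simp only [List.foldl_cons, List.map_cons, ih, String.toList_append]
      rfl

theorem foldl_comma_flatMap (ns : List (List Char)) (acc : List Char) :
    ns.foldl (fun a n => a ++ n ++ [',']) acc = acc ++ ns.flatMap (fun n => n ++ [',']) := by
  have he : (fun (a n : List Char) => a ++ n ++ [',']) = fun a n => a ++ (n ++ [',']) := by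
    funext a n; simp
  rw [he, PySem.List.foldl_append_eq_flatMap]

theorem flatMap_comma_join (ns : List (List Char)) (h : ns ≠ []) :
    ns.flatMap (fun n => n ++ [',']) = PySem.Chars.join [','] ns ++ [','] := by
  induction ns with
  | nil => exact absurd rfl h
  | cons p ns ih =>
      cases ns with
      | nil => simp [PySem.Chars.join_singleton]
      | cons q rest =>
          rw [List.flatMap_cons, ih (by simp), PySem.Chars.join_cons_cons]
          simp

-- A's trailing-comma fold + [:-1] is join "," on a nonempty name list
theorem fold_slice_eq_join (ns : List String) (h : ns ≠ []) :
    PySem.Str.slice (ns.foldl (fun acc s => acc ++ s ++ ",") "") none (some (-1))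
      = PySem.Str.join "," ns := by
  rw [← String.toList_inj, PySem.Str.slice_to_neg_one, PySem.Str.toList_join]
  rw [foldl_str_comma, foldl_comma_flatMap,
      flatMap_comma_join _ (by simpa using h)]
  simp

theorem pre_facts (metals : String) (hpre : Pre_find_ref_exp_mrg_class metals) :
    ∀ p ∈ (PySem.Str.split? metals ",").getD [],
      nameAt (idxOf (PySem.Str.strip p)) = PySem.Str.strip p
        ∧ 0 ≤ idxOf (PySem.Str.strip p) ∧ idxOf (PySem.Str.strip p) < 23 :=
  fun p hp => key_facts _ (hpre p hp)

-- ===== VERDICT (by name: the statement is the Claim_ definition above) =====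
theorem find_ref_exp_mrg_class_spec : Claim_equal_find_ref_exp_mrg_class := by
  intro metals _ hpre
  unfold Spec_find_ref_exp_mrg_class find_ref_exp_mrg_class find_ref_exp_mrg_class_alt
  dsimp only
  rcases eq_or_ne ((PySem.Str.split? metals ",").getD []) [] with hnil | hne
  · simp only [hnil]
    decide
  · have hfacts := pre_facts metals hpre
    set parts := (PySem.Str.split? metals ",").getD [] with hparts
    set is := parts.map (fun p => idxOf (PySem.Str.strip p)) with his
    rw [PySem.List.foldl_append_singleton_eq_map]
    have hcnt : parts.foldl
        (fun d part =>
          let i := (indexOfMetals.get? (PySem.Str.strip part)).getD 0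
          d.insert i (d.getD i 0 + (1 : Int))) PySem.Dict.empty = PySem.Dict.counter is := by
      rw [← PySem.Dict.foldl_insert_getD_add_one_eq_counter, his, List.foldl_map]
      rfl
    rw [hcnt]
    have hsize : (indexOfMetals.size : Int) = 23 := by decide
    rw [hsize, PySem.List.foldl_append_eq_flatMap, List.nil_append]
    have hbounds : ∀ i ∈ is, 0 ≤ i ∧ i < 23 := by
      intro i hi
      rw [his] at hi
      rcases List.mem_map.mp hi with ⟨p, hp, rfl⟩
      exact (hfacts p hp).2
    have hL : parts.map (fun i => (((indexOfMetals.get? (PySem.Str.strip i)).getD 0,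
          PySem.Str.strip i) : Int × String)) = is.map gI := by
      rw [his, List.map_map]
      refine List.map_congr_left ?_
      intro p hp
      have := (hfacts p hp).1
      simp only [Function.comp, gI]
      exact Prod.ext rfl this.symm
    rw [List.nil_append, hL, sorted2_map_gI, sorted_buckets is hbounds]
    set bucket := (PySem.List.pyRange 0 23).flatMap (fun k => List.replicate (is.count k) k)
      with hbucket
    have hLne : bucket.map gI ≠ [] := by
      have hperm : bucket.Perm (PySem.List.sorted is (fun x => x) false) := by
        rw [sorted_buckets is hbounds]
      have hlen : bucket.length = is.length := by
        rw [hperm.length_eq, PySem.List.length_sorted]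
      intro hcon
      rw [List.map_eq_nil_iff] at hcon
      rw [hcon] at hlen
      have hplen : parts.length = 0 := by
        rw [his] at hlen; simpa using hlen.symm
      exact hne (List.length_eq_zero_iff.mp hplen)
    have hjoin : (bucket.map gI).foldl (fun acc p => acc ++ p.2 ++ ",") "" =
        ((bucket.map gI).map (fun p => p.2)).foldl (fun acc s => acc ++ s ++ ",") "" := by
      simp only [List.map_map, List.foldl_map]
      rfl
    rw [hjoin, fold_slice_eq_join _ (by simpa using hLne)]
    congr 1
    rw [List.map_map, List.map_flatMap]
    refine List.flatMap_congr ?_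
    intro k _
    simp [List.map_replicate, gI, nameAt, PySem.Dict.getD_counter]
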